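-- pv_equiv track=rewrite | github.com/torvalds/linux | tools/verification/rvgen/rvgen/ltl2k.py | abbreviate_atoms
-- ===== SOURCE A (Python) =====
-- def abbreviate_atoms(atoms: list[str]) -> list[str]:
--     def shorten(s: str) -> str:
--         skip = ["is", "by", "or", "and"]
--         return '_'.join([x[:2] for x in s.lower().split('_') if x not in skip])
--
--     abbrs = []
--     for atom in atoms:
--         for i in range(len(atom), -1, -1):
--             if sum(a.startswith(atom[:i]) for a in atoms) > 1:
--                 break
--         share = atom[:i]
--         unique = atom[i:]
--         abbrs.append((shorten(share) + shorten(unique)))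
--     return abbrs
-- ===== SOURCE B (Python) =====
-- def abbreviate_atoms(atoms: list[str]) -> list[str]:
--     def shorten(s: str) -> str:
--         skip = ["is", "by", "or", "and"]
--         return '_'.join([x[:2] for x in s.lower().split('_') if x not in skip])
--
--     def lcp(a: str, b: str) -> int:
--         k = 0
--         for x, y in zip(a, b):
--             if x != y:
--                 return k
--             k += 1
--         return k
--
--     abbrs = []
--     before = []
--     after = list(atoms)
--     while after:
--         atom, after = after[0], after[1:]
--         m = max((lcp(atom, b) for b in before + after), default=0)
--         abbrs.append(shorten(atom[:m]) + shorten(atom[m:]))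
--         before.append(atom)
--     return abbrs
-- ===== Notes on version B (the rewrite author's own statement) =====
-- stated objective: alternative
-- what changed: Instead of counting, for every prefix length i of each atom (scanning downward from len(atom)), how many atoms start with that prefix, B computes for each atom the longest common prefix with each other atom in a single pass and splits the atom at the maximum of those lengths.
import Mathlib
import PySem

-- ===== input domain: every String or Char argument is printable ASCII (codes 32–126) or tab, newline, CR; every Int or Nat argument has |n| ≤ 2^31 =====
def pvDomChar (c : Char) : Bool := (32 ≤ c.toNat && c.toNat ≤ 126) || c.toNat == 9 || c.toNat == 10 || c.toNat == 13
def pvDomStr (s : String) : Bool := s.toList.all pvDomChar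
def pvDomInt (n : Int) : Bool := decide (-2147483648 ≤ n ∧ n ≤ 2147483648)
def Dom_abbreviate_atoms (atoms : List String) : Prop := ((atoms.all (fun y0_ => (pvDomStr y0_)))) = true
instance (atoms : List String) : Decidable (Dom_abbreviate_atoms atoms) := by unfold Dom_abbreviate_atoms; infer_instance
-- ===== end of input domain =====

-- B replaces A's per-prefix-length popularity count by a single longest-common-prefix
-- computation against each other atom (max over them), which is the same split point.

-- ===== PORT A =====
-- shorten(s) of A, step for step ('.getD []' only discharges split?'s sep ≠ "" totality side condition: the separator is the literal "_")
def shortenA (s : String) : String :=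
  let skip : List String := ["is", "by", "or", "and"]
  PySem.Str.join "_"
    ((((PySem.Str.split? (PySem.Str.lower s) "_").getD []).filter
        (fun x => !(skip.contains x))).map (fun x => PySem.Str.slice x none (some 2)))

-- the inner 'for i in range(len(atom), -1, -1): if …: break' leaves in i the first value
-- satisfying the test, or the last value of the range (0) if none does: find? + getD 0
def abbreviate_atoms (atoms : List String) : List String :=
  atoms.map (fun atom =>
    let i : Int :=
      (((PySem.List.pyRange (PySem.Str.len atom) (-1) (-1)).find? (fun i =>
          decide (1 < atoms.countP (fun a =>
            PySem.Str.startswith a (PySem.Str.slice atom none (some i)))))).getD 0)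
    shortenA (PySem.Str.slice atom none (some i)) ++ shortenA (PySem.Str.slice atom (some i) none))

-- ===== PORT B =====
def shortenB (s : String) : String :=
  let skip : List String := ["is", "by", "or", "and"]
  PySem.Str.join "_"
    ((((PySem.Str.split? (PySem.Str.lower s) "_").getD []).filter
        (fun x => !(skip.contains x))).map (fun x => PySem.Str.slice x none (some 2)))

-- Source B's lcp: 'for x, y in zip(a, b): if x != y: return k; k += 1; return k'
def lcpB : List (Char × Char) → Nat → Nat
  | [], k => k
  | (x, y) :: rest, k => if x ≠ y then k else lcpB rest (k + 1)

-- Source B's while loop: 'atom, after = after[0], after[1:]; … ; before.append(atom)'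
def bLoop : List String → List String → List String
  | _, [] => []
  | before, atom :: after =>
    let m : Nat := (before ++ after).foldl
      (fun acc b => max acc (lcpB (atom.toList.zip b.toList) 0)) 0
    (shortenB (PySem.Str.slice atom none (some (m : Int))) ++
        shortenB (PySem.Str.slice atom (some (m : Int)) none)) :: bLoop (before ++ [atom]) after

def abbreviate_atoms_alt (atoms : List String) : List String := bLoop [] atoms

-- ===== PRECONDITION & SPEC =====
def Spec_abbreviate_atoms (atoms : List String) (out : List String) : Prop := out = abbreviate_atoms_alt atoms
instance (atoms : List String) (out : List String) : Decidable (Spec_abbreviate_atoms atoms out) := by unfold Spec_abbreviate_atoms; infer_instance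

-- ===== CLAIM (what is proved, stated in full; the proofs are below) =====
def Claim_equal_abbreviate_atoms : Prop := ∀ (atoms : List String), Dom_abbreviate_atoms atoms → Spec_abbreviate_atoms atoms (abbreviate_atoms atoms)

-- ===== LEMMAS AND PROOFS =====

-- A's split index, named for the proofs
def idxA (atoms : List String) (atom : String) : Int :=
  (((PySem.List.pyRange (PySem.Str.len atom) (-1) (-1)).find? (fun i =>
      decide (1 < atoms.countP (fun a =>
        PySem.Str.startswith a (PySem.Str.slice atom none (some i)))))).getD 0)

lemma A_eq_map (atoms : List String) :
    abbreviate_atoms atoms = atoms.map (fun atom =>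
      shortenA (PySem.Str.slice atom none (some (idxA atoms atom))) ++
        shortenA (PySem.Str.slice atom (some (idxA atoms atom)) none)) := rfl

lemma lcpB_acc (l : List (Char × Char)) (k : Nat) : lcpB l k = k + lcpB l 0 := by
  induction l generalizing k with
  | nil => simp [lcpB]
  | cons p rest ih =>
    obtain ⟨x, y⟩ := p
    by_cases h : x = y
    · simp [lcpB, h, ih (k + 1), ih 1]; omega
    · simp [lcpB, h]

lemma lcp0_le (as : List Char) : ∀ bs, lcpB (as.zip bs) 0 ≤ as.length := by
  induction as with
  | nil => intro bs; simp [lcpB]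
  | cons a as ih =>
    intro bs
    cases bs with
    | nil => simp [lcpB]
    | cons b bs =>
      by_cases h : a = b
      · subst h
        have hacc := lcpB_acc (as.zip bs) 1
        simp only [List.zip_cons_cons, lcpB, List.length_cons]
        rw [if_neg (by simp), hacc]
        have := ih bs
        omega
      · simp [lcpB, h]

lemma take_prefix_iff_lcp (as : List Char) :
    ∀ (bs : List Char) (k : Nat), k ≤ as.length →
      ((as.take k <+: bs) ↔ k ≤ lcpB (as.zip bs) 0) := by
  induction as with
  | nil =>
    intro bs k hk
    have : k = 0 := Nat.le_zero.mp hk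
    subst this
    simp [lcpB]
  | cons a as ih =>
    intro bs k hk
    cases bs with
    | nil =>
      simp only [List.zip_nil_right, lcpB, Nat.le_zero]
      constructor
      · intro h
        have := h.length_le
        simpa [List.length_take] using (by simpa using this : min k (as.length + 1) = 0)
      · intro h; subst h; simp
    | cons b bs =>
      cases k with
      | zero => simp [List.nil_prefix]
      | succ k' =>
        have hk' : k' ≤ as.length := by simpa using hk
        by_cases h : a = b
        · subst h
          have hacc := lcpB_acc (as.zip bs) (0 + 1)
          simp only [List.take_succ_cons, List.zip_cons_cons, lcpB, List.cons_prefix_cons]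
          rw [if_neg (by simp), hacc, ih bs k' hk']
          simp only [true_and]
          omega
        · simp only [List.take_succ_cons, List.zip_cons_cons, lcpB, ne_eq, List.cons_prefix_cons]
          rw [if_pos h]
          simp [h]

lemma foldmax_le {α : Type} (l : List α) (g : α → Nat) (n : Nat)
    (h : ∀ b ∈ l, g b ≤ n) : ∀ init, init ≤ n →
      l.foldl (fun acc b => max acc (g b)) init ≤ n := by
  induction l with
  | nil => intro init h0; simpa using h0
  | cons b l ih =>
    intro init h0
    simp only [List.foldl_cons]
    exact ih (fun x hx => h x (by simp [hx])) _
      (max_le h0 (h b (by simp)))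

lemma le_foldmax_iff {α : Type} (l : List α) (g : α → Nat) (k : Nat) :
    ∀ init, (k ≤ l.foldl (fun acc b => max acc (g b)) init ↔
      k ≤ init ∨ ∃ b ∈ l, k ≤ g b) := by
  induction l with
  | nil => intro init; simp
  | cons b l ih =>
    intro init
    simp only [List.foldl_cons, ih (max init (g b)), le_max_iff, List.mem_cons]
    constructor
    · rintro ((h | h) | ⟨c, hc, hkc⟩)
      · exact Or.inl h
      · exact Or.inr ⟨b, Or.inl rfl, h⟩
      · exact Or.inr ⟨c, Or.inr hc, hkc⟩
    · rintro (h | ⟨c, (rfl | hc), hkc⟩)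
      · exact Or.inl (Or.inl h)
      · exact Or.inl (Or.inr hkc)
      · exact Or.inr ⟨c, hc, hkc⟩

lemma find_desc (c : Int → Bool) : ∀ (h : Nat) (m : Nat), m ≤ h →
    (∀ i : Nat, i ≤ h → (c i = true ↔ i ≤ m)) →
      (PySem.List.pyRange (h : Int) (-1) (-1)).find? c = some (m : Int) := by
  intro h
  induction h with
  | zero =>
    intro m hm hc
    have hm0 : m = 0 := Nat.le_zero.mp hm
    subst hm0
    have h0 : c 0 = true := by simpa using (hc 0 le_rfl).mpr le_rfl
    rw [PySem.List.pyRange_neg_one_cons (by norm_num),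
      PySem.List.pyRange_neg_one_eq_nil (by norm_num)]
    simp [List.find?, h0]
  | succ h ih =>
    intro m hm hc
    rw [PySem.List.pyRange_neg_one_cons (by omega)]
    by_cases hmh : m = h + 1
    · subst hmh
      have h1 : c ((h : Nat) + 1 : Nat) = true := (hc (h + 1) le_rfl).mpr le_rfl
      push_cast at h1
      rw [List.find?]
      push_cast
      rw [h1]
    · have hm' : m ≤ h := by omega
      have hfalse : c ((h : Int) + 1) = false := by
        have := hc (h + 1) le_rfl
        push_cast at this
        rw [Bool.eq_false_iff, ne_eq, this]
        omega
      rw [List.find?]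
      push_cast
      rw [hfalse]
      have h2 : ((h : Int) + 1 - 1) = (h : Int) := by ring
      rw [h2]
      exact ih m hm' (fun i hi => hc i (by omega))

lemma toList_slice_take (atom : String) (i : Nat) :
    (PySem.Str.slice atom none (some (i : Int))).toList = atom.toList.take i := by
  simp only [PySem.Str.slice, PySem.Chars.slice]
  rw [PySem.List.slice_to atom.toList (by positivity)]
  simp

lemma idxA_eq (before after : List String) (atom : String) :
    idxA (before ++ atom :: after) atom =
      ((before ++ after).foldl
        (fun acc b => max acc (lcpB (atom.toList.zip b.toList) 0)) 0 : Nat) := by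
  set n := atom.toList.length with hn
  set m : Nat := (before ++ after).foldl
    (fun acc b => max acc (lcpB (atom.toList.zip b.toList) 0)) 0 with hmdef
  have hlen : PySem.Str.len atom = (n : Int) := by simp [PySem.Str.len_eq, hn]
  have hmn : m ≤ n :=
    foldmax_le _ _ n (fun b _ => lcp0_le atom.toList b.toList) 0 (Nat.zero_le n)
  have hp_self : ∀ i : Nat, i ≤ n →
      PySem.Str.startswith atom (PySem.Str.slice atom none (some (i : Int))) = true := by
    intro i hi
    rw [PySem.Str.startswith_eq, PySem.Chars.startswith_iff, toList_slice_take]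
    exact List.take_prefix _ _
  rcases hoth : before ++ after with _ | ⟨b0, others'⟩
  · -- no other atom at all: the test never fires, i ends at 0, and m = 0
    obtain ⟨hb, ha⟩ := List.append_eq_nil_iff.mp hoth
    subst hb; subst ha
    have hz : idxA [atom] atom = 0 := by
      unfold idxA
      rw [List.find?_eq_none.mpr ?_]
      · rfl
      · intro i _hi
        simp only [decide_eq_true_eq, not_lt, List.countP_cons, List.countP_nil]
        split <;> omega
    have hm0 : m = 0 := by rw [hmdef]; rfl
    rw [hm0]
    simpa using hz
  · -- at least one other atom: the test is 'i ≤ m' on 0..n, and the countdown stops at m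
    have hne : before ++ after ≠ [] := by rw [hoth]; simp
    unfold idxA
    rw [hlen, find_desc _ n m hmn ?_]
    · rfl
    · intro i hi
      simp only [decide_eq_true_eq]
      have hcount : (before ++ atom :: after).countP (fun a =>
          PySem.Str.startswith a (PySem.Str.slice atom none (some (i : Int)))) =
          (before ++ after).countP (fun a =>
            PySem.Str.startswith a (PySem.Str.slice atom none (some (i : Int)))) + 1 := by
        simp only [List.countP_append, List.countP_cons, hp_self i hi, if_true]
        omega
      rw [hcount]
      have hiff : ∀ b : String,
          (PySem.Str.startswith b (PySem.Str.slice atom none (some (i : Int))) = true) ↔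
            i ≤ lcpB (atom.toList.zip b.toList) 0 := by
        intro b
        rw [PySem.Str.startswith_eq, PySem.Chars.startswith_iff, toList_slice_take]
        exact take_prefix_iff_lcp atom.toList b.toList i hi
      constructor
      · intro hgt
        have hpos : 0 < (before ++ after).countP (fun a =>
            PySem.Str.startswith a (PySem.Str.slice atom none (some (i : Int)))) := by omega
        obtain ⟨b, hb, hpb⟩ := List.countP_pos_iff.mp hpos
        have : i ≤ lcpB (atom.toList.zip b.toList) 0 := (hiff b).mp hpb
        rw [hmdef, le_foldmax_iff]
        exact Or.inr ⟨b, hb, this⟩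
      · intro him
        have := (le_foldmax_iff (before ++ after)
          (fun b => lcpB (atom.toList.zip b.toList) 0) i 0).mp (by rw [← hmdef]; exact him)
        obtain ⟨b, hb, hkb⟩ : ∃ b ∈ before ++ after, i ≤ lcpB (atom.toList.zip b.toList) 0 := by
          rcases this with h0 | h
          · obtain ⟨b, hb⟩ := List.exists_mem_of_ne_nil _ hne
            exact ⟨b, hb, by omega⟩
          · exact h
        have hpb := (hiff b).mpr hkb
        have hpos : 0 < (before ++ after).countP (fun a =>
            PySem.Str.startswith a (PySem.Str.slice atom none (some (i : Int)))) :=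
          List.countP_pos_iff.mpr ⟨b, hb, hpb⟩
        omega

lemma shortenB_eq : shortenB = shortenA := rfl

lemma bLoop_eq (after : List String) : ∀ before : List String,
    bLoop before after = after.map (fun atom =>
      shortenA (PySem.Str.slice atom none (some (idxA (before ++ after) atom))) ++
        shortenA (PySem.Str.slice atom (some (idxA (before ++ after) atom)) none)) := by
  induction after with
  | nil => intro before; rfl
  | cons atom after ih =>
    intro before
    rw [List.map_cons, bLoop, shortenB_eq]
    have hidx := idxA_eq before after atom
    rw [show before ++ atom :: after = (before ++ [atom]) ++ after by simp] at hidx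
    rw [show before ++ atom :: after = (before ++ [atom]) ++ after by simp]
    rw [← hidx, ih (before ++ [atom])]

-- ===== VERDICT (by name: the statement is the Claim_ definition above) =====
theorem abbreviate_atoms_spec : Claim_equal_abbreviate_atoms := by
  intro atoms _hdom
  unfold Spec_abbreviate_atoms abbreviate_atoms_alt
  rw [bLoop_eq atoms [], A_eq_map]
  rfl
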